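-- pv_equiv track=rewrite | github.com/willfrancis04/Thesis | Distribution:KS - Independence Analysis/WF_Recon_newdata.py | _hitter_team_from_matchups
-- ===== SOURCE A (Python) =====
-- def _hitter_team_from_matchups(matchups):
--     """Given list of (team1, team2) per row, return the team that appears in every row (hitter's team)."""
--     if not matchups:
--         return None
--     first_set = set(matchups[0])
--     for m in matchups[1:]:
--         first_set &= set(m)
--     if len(first_set) == 1:
--         return first_set.pop()
--     if len(first_set) == 2:
--         return None
--     return None
-- ===== SOURCE B (Python) =====
-- def _hitter_team_from_matchups(matchups):
--     """Given list of (team1, team2) per row, return the team that appears in every row (hitter's team)."""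
--     if not matchups:
--         return None
--     n = len(matchups)
--     counts = {}
--     for m in matchups:
--         for t in set(m):
--             counts[t] = counts.get(t, 0) + 1
--     candidates = [t for t, c in counts.items() if c == n]
--     return candidates[0] if len(candidates) == 1 else None
-- ===== Notes on version B (the rewrite author's own statement) =====
-- stated objective: alternative
-- what changed: Replaces the running set-intersection across rows by a single table build (one count per team over the deduplicated rows) followed by a filter for teams whose count equals the number of rows, returning the unique such team.
import Mathlib
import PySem

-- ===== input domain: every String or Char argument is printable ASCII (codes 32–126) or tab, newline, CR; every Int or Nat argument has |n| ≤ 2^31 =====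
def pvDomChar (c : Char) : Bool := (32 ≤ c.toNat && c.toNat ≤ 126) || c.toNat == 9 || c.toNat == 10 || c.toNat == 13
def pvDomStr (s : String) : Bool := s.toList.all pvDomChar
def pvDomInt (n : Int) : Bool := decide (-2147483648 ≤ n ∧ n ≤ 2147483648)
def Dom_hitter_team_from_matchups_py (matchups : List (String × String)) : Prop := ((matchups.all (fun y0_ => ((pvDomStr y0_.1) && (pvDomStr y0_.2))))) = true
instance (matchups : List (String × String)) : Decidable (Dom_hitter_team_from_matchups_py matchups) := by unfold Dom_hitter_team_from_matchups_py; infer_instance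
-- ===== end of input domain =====

-- B replaces A's running set-intersection by a count table built over the deduplicated rows,
-- then filters for teams counted in every row (alternative decomposition, same cost).


-- ===== PORT A =====
-- literal port of A: intersect set(matchups[0]) with set(m) for each later row;
-- first_set.pop() on a one-element set is that element (head?).
def hitter_team_from_matchups_py (matchups : List (String × String)) : Option String :=
  match matchups with
  | [] => none
  | m :: rest =>
    let firstSet :=
      rest.foldl (fun s r => PySem.Set.inter s (PySem.Set.ofList [r.1, r.2]))
        (PySem.Set.ofList [m.1, m.2])
    if PySem.Set.len firstSet = 1 then firstSet.head?
    else if PySem.Set.len firstSet = 2 then none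
    else none

-- ===== PORT B =====
-- literal port of B: build counts over set(m) per row, filter counts equal to len(matchups).
def hitter_team_from_matchups_py_alt (matchups : List (String × String)) : Option String :=
  if matchups.isEmpty then none
  else
    let n := matchups.length
    let counts :=
      matchups.foldl
        (fun d m => (PySem.Set.ofList [m.1, m.2]).foldl
          (fun d t => d.insert t (d.getD t 0 + 1)) d)
        PySem.Dict.empty
    let candidates :=
      (counts.items.filter (fun p => p.2 == (n : Int))).map (fun p => p.1)
    if candidates.length = 1 then candidates.head? else none

-- ===== PRECONDITION & SPEC =====
def Spec_hitter_team_from_matchups_py (matchups : List (String × String)) (out : Option String) : Prop := out = hitter_team_from_matchups_py_alt matchups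
instance (matchups : List (String × String)) (out : Option String) : Decidable (Spec_hitter_team_from_matchups_py matchups out) := by unfold Spec_hitter_team_from_matchups_py; infer_instance

-- ===== CLAIM (what is proved, stated in full; the proofs are below) =====
def Claim_equal_hitter_team_from_matchups_py : Prop := ∀ (matchups : List (String × String)), Dom_hitter_team_from_matchups_py matchups → Spec_hitter_team_from_matchups_py matchups (hitter_team_from_matchups_py matchups)

-- ===== LEMMAS AND PROOFS =====

-- A's folded intersection: membership characterisation.
theorem pv_mem_interFold (rest : List (String × String)) (s : PySem.Set String) (t : String) :
    t ∈ rest.foldl (fun s r => PySem.Set.inter s (PySem.Set.ofList [r.1, r.2])) s ↔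
      t ∈ s ∧ ∀ r ∈ rest, t = r.1 ∨ t = r.2 := by
  induction rest generalizing s with
  | nil => simp
  | cons r rs ih =>
    simp only [List.foldl_cons, ih, PySem.Set.mem_inter, PySem.Set.mem_ofList, List.mem_cons]
    aesop

theorem pv_nodup_interFold (rest : List (String × String)) (s : PySem.Set String) (h : s.Nodup) :
    (rest.foldl (fun s r => PySem.Set.inter s (PySem.Set.ofList [r.1, r.2])) s).Nodup := by
  induction rest generalizing s with
  | nil => exact h
  | cons r rs ih => exact ih _ (PySem.Set.nodup_inter _ _ h)

-- B's counter: value at t is the number of rows whose (deduplicated) pair contains t.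
theorem pv_count_row (a b t : String) :
    (PySem.Set.ofList [a, b]).count t = if t = a ∨ t = b then 1 else 0 := by
  by_cases h : t ∈ PySem.Set.ofList [a, b]
  · rw [if_pos]
    · exact List.count_eq_one_of_mem (PySem.Set.nodup_ofList _) h
    · simpa [PySem.Set.mem_ofList] using h
  · rw [if_neg, List.count_eq_zero_of_not_mem h]
    simpa [PySem.Set.mem_ofList] using h

theorem pv_counts_getD (l : List (String × String)) (d : PySem.Dict String Int) (t : String) :
    (l.foldl
        (fun d m => (PySem.Set.ofList [m.1, m.2]).foldl
          (fun d t => d.insert t (d.getD t 0 + 1)) d) d).getD t 0 =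
      d.getD t 0 + (l.countP (fun m => decide (t = m.1 ∨ t = m.2)) : Int) := by
  induction l generalizing d with
  | nil => simp
  | cons m ms ih =>
    simp only [List.foldl_cons, ih, PySem.Dict.getD_foldl_insert_add_one, pv_count_row,
      List.countP_cons]
    by_cases h : t = m.1 ∨ t = m.2
    · simp [h]; ring
    · simp [h]

theorem pv_counts_keys_nodup (l : List (String × String)) (d : PySem.Dict String Int)
    (h : d.keys.Nodup) :
    (l.foldl
        (fun d m => (PySem.Set.ofList [m.1, m.2]).foldl
          (fun d t => d.insert t (d.getD t 0 + 1)) d) d).keys.Nodup := by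
  induction l generalizing d with
  | nil => exact h
  | cons m ms ih => exact ih _ (PySem.Dict.nodup_keys_foldl_insert _ _ _ h)

theorem pv_counts_mem_keys (l : List (String × String)) (d : PySem.Dict String Int) (t : String) :
    t ∈ (l.foldl
        (fun d m => (PySem.Set.ofList [m.1, m.2]).foldl
          (fun d t => d.insert t (d.getD t 0 + 1)) d) d).keys ↔
      t ∈ d.keys ∨ ∃ m ∈ l, t = m.1 ∨ t = m.2 := by
  induction l generalizing d with
  | nil => simp
  | cons m ms ih =>
    simp only [List.foldl_cons, ih, PySem.Dict.keys_foldl_insert, PySem.Set.mem_update,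
      PySem.Set.mem_ofList, List.mem_cons]
    aesop


-- B's candidate list: membership characterisation.
theorem pv_mem_candidates (d : PySem.Dict String Int) (hnd : d.keys.Nodup) (n : Int) (t : String) :
    t ∈ (d.items.filter (fun p => p.2 == n)).map (fun p => p.1) ↔
      t ∈ d.keys ∧ d.getD t 0 = n := by
  constructor
  · rintro ht
    simp only [List.mem_map, List.mem_filter, beq_iff_eq] at ht
    obtain ⟨p, ⟨hp, hpn⟩, hpt⟩ := ht
    obtain ⟨k, v⟩ := p
    cases hpt
    exact ⟨PySem.Dict.mem_keys_of_mem_items d hp,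
      by rw [PySem.Dict.getD_of_mem_items d hp hnd 0]; exact hpn⟩
  · rintro ⟨hk, hv⟩
    have hc : d.contains t = true := (PySem.Dict.contains_iff_mem_keys d t).mpr hk
    rw [PySem.Dict.contains_eq_isSome_get?] at hc
    obtain ⟨v, hvv⟩ := Option.isSome_iff_exists.mp hc
    have hvn : v = n := by rw [← hv, PySem.Dict.getD_of_get?_eq_some d 0 hvv]
    subst hvn
    have := PySem.Dict.mem_items_of_get?_eq_some d hvv
    simp only [List.mem_map, List.mem_filter, beq_iff_eq]
    exact ⟨(t, v), ⟨this, rfl⟩, rfl⟩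

theorem pv_nodup_candidates (d : PySem.Dict String Int) (hnd : d.keys.Nodup) (n : Int) :
    ((d.items.filter (fun p => p.2 == n)).map (fun p => p.1)).Nodup := by
  have h0 : (d.items.filter (fun p => p.2 == n)).Sublist d.items := List.filter_sublist
  have hsub := h0.map (fun p => p.1)
  have : d.keys = d.items.map (fun p => p.1) := by simp [PySem.Dict.keys]
  exact (this ▸ hnd).sublist hsub

-- ===== VERDICT (by name: the statement is the Claim_ definition above) =====
theorem hitter_team_from_matchups_py_spec : Claim_equal_hitter_team_from_matchups_py := by
  intro matchups _
  unfold Spec_hitter_team_from_matchups_py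
  match matchups with
  | [] => rfl
  | m :: rest =>
    simp only [hitter_team_from_matchups_py, hitter_team_from_matchups_py_alt, List.isEmpty_cons,
      if_neg Bool.false_ne_true]
    set n := (m :: rest).length with hn
    set counts : PySem.Dict String Int := (m :: rest).foldl
      (fun d m => (PySem.Set.ofList [m.1, m.2]).foldl
        (fun d t => d.insert t (d.getD t 0 + 1)) d) PySem.Dict.empty with hcounts
    set SA := rest.foldl (fun s r => PySem.Set.inter s (PySem.Set.ofList [r.1, r.2]))
      (PySem.Set.ofList [m.1, m.2]) with hSA
    set C := (counts.items.filter (fun p => p.2 == (n : Int))).map (fun p => p.1) with hC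
    have hnd : counts.keys.Nodup := pv_counts_keys_nodup _ _ PySem.Dict.nodup_keys_empty
    have hmemA : ∀ t, t ∈ SA ↔ ∀ r ∈ m :: rest, t = r.1 ∨ t = r.2 := by
      intro t
      rw [hSA, pv_mem_interFold]
      simp [PySem.Set.mem_ofList]
    have hmemC : ∀ t, t ∈ C ↔ ∀ r ∈ m :: rest, t = r.1 ∨ t = r.2 := by
      intro t
      rw [hC, pv_mem_candidates counts hnd, hcounts, pv_counts_getD]
      simp only [PySem.Dict.getD_empty, zero_add, pv_counts_mem_keys, PySem.Dict.keys_empty]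
      constructor
      · rintro ⟨_, hcnt⟩
        have : (m :: rest).countP (fun r => decide (t = r.1 ∨ t = r.2)) = n := by
          exact_mod_cast hcnt
        intro r hr
        have := List.countP_eq_length.mp (hn ▸ this) r hr
        simpa using this
      · intro hall
        refine ⟨Or.inr ⟨m, List.mem_cons_self, hall m List.mem_cons_self⟩, ?_⟩
        have : (m :: rest).countP (fun r => decide (t = r.1 ∨ t = r.2)) = n := by
          rw [hn]; exact List.countP_eq_length.mpr (fun r hr => by simpa using hall r hr)
        exact_mod_cast this
    have hmem : ∀ t, t ∈ SA ↔ t ∈ C := fun t => (hmemA t).trans (hmemC t).symm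
    have hndA : SA.Nodup := pv_nodup_interFold _ _ (PySem.Set.nodup_ofList _)
    have hndC : C.Nodup := pv_nodup_candidates counts hnd _
    have hlen : SA.length = C.length :=
      ((List.perm_ext_iff_of_nodup hndA hndC).mpr hmem).length_eq
    by_cases h1 : SA.length = 1
    · obtain ⟨x, hx⟩ := List.length_eq_one_iff.mp h1
      obtain ⟨y, hy⟩ := List.length_eq_one_iff.mp (hlen ▸ h1)
      have hxy : x = y := by
        have := (hmem x).mp (by simp [hx])
        simpa [hy] using this
      rw [if_pos, if_pos (hlen ▸ h1)]
      · simp [hx, hy, hxy]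
      · simp [PySem.Set.len, h1]
    · rw [if_neg, if_neg (fun hc => h1 (hlen.trans hc))]
      · split <;> rfl
      · simp [PySem.Set.len, h1]
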